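-- pv_equiv track=rewrite | github.com/theperk08/SDR_decoder | ACARS2023.py | trouvesignal
-- ===== SOURCE A (Python) =====
-- def trouvesignal(chaine):
--     #Un bon signal ACARS se détache facilement du bruit de fond
--     #par une valeur très haute ou très basse
--     #du coup valeur aux alentours de 127-128
--     #donc entre 120 et 140 ça devrait être bon
--
--     trouve = False
--     i = 0
--
--     while i < int(len(chaine) / 2) - 1 and trouve == False:
--
--         valeur = chaine[2 * i + 1]
--         if valeur > 75 and valeur < 128:
--             for b in range(15, 30):
--                 if (2*(i + b) + 1 < len(chaine)):
--                     if chaine[2*(i + b) + 1] > 65 and chaine[2*(i + b) + 1] < 128: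
--                         trouve=True
--         i += 1
--     if trouve == True:
--         return("ok")
--     else:
--         return("rien")
-- ===== SOURCE B (Python) =====
-- def trouvesignal(chaine):
--     n = len(chaine)
--     m = n // 2
--     # values at odd positions; odd[j] == chaine[2*j+1] and every such index is valid
--     odd = [chaine[2 * j + 1] for j in range(m)]
--     # 0/1 table marking odd slots whose value lies strictly between 65 and 128
--     mark = [1 if 65 < v < 128 else 0 for v in odd]
--     # prefix sums of the table: pref[k] = number of marked slots among the first k
--     pref = [0]
--     s = 0
--     for x in mark:
--         s += x
--         pref.append(s)
--     for i in range(m - 1):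
--         v = odd[i]
--         if 75 < v < 128:
--             lo = min(i + 15, m)
--             hi = min(i + 30, m)
--             if pref[hi] - pref[lo] > 0:
--                 return "ok"
--     return "rien"
-- ===== Notes on version B (the rewrite author's own statement) =====
-- stated objective: alternative
-- what changed: Replaces the while-loop with a nested 15-step rescan per position by a precomputed table of marked odd slots plus its prefix sums, so each window test becomes one subtraction and the scan is a single pass with no inner loop.
import Mathlib
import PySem

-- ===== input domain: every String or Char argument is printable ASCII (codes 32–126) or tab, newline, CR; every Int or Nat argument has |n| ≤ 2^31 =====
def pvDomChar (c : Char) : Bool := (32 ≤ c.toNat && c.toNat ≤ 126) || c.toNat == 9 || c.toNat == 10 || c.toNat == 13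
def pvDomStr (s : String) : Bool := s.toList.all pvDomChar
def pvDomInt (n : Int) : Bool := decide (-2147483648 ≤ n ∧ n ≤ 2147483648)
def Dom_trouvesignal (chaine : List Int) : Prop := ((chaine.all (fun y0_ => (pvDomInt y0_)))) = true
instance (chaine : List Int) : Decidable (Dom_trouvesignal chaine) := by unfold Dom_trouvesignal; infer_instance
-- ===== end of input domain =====

-- B replaces A's while-loop with its 15-step inner rescan per candidate position by a marked-slot table over the odd positions plus its prefix sums, so each window test is one subtraction (objective: alternative, same asymptotic cost).


-- ===== PORT A =====
def trouvesignal (chaine : List Int) : String :=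
  let n : Int := PySem.List.len chaine
  -- int(len(chaine) / 2): true division then truncation; len ≥ 0, so this is floor division
  let bound : Int := PySem.Int.floordiv n 2 - 1
  let trouve : Bool := (PySem.List.pyRange 0 bound 1).foldl (fun trouve i =>
    if trouve then trouve
    else
      let valeur : Int := PySem.List.pyGetD chaine (2 * i + 1) 0
      if valeur > 75 ∧ valeur < 128 then
        (PySem.List.pyRange 15 30 1).foldl (fun t b =>
          if 2 * (i + b) + 1 < n then
            if PySem.List.pyGetD chaine (2 * (i + b) + 1) 0 > 65 ∧
               PySem.List.pyGetD chaine (2 * (i + b) + 1) 0 < 128 then true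
            else t
          else t) trouve
      else trouve) false
  if trouve then "ok" else "rien"

-- ===== PORT B =====
def trouvesignal_alt (chaine : List Int) : String :=
  let n : Int := PySem.List.len chaine
  let m : Int := PySem.Int.floordiv n 2
  let odd : List Int := (PySem.List.pyRange 0 m 1).map (fun j => PySem.List.pyGetD chaine (2 * j + 1) 0)
  let mark : List Int := odd.map (fun v => if 65 < v ∧ v < 128 then (1 : Int) else 0)
  let pref : List Int := (mark.foldl (fun (p : List Int × Int) x => (p.1 ++ [p.2 + x], p.2 + x)) ([0], 0)).1
  if ((PySem.List.pyRange 0 (m - 1) 1).find? (fun i =>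
      let v : Int := PySem.List.pyGetD odd i 0
      (75 < v ∧ v < 128) ∧
        PySem.List.pyGetD pref (min (i + 30) m) 0 - PySem.List.pyGetD pref (min (i + 15) m) 0 > 0)).isSome
  then "ok" else "rien"

-- ===== PRECONDITION & SPEC =====
def Spec_trouvesignal (chaine : List Int) (out : String) : Prop := out = trouvesignal_alt chaine
instance (chaine : List Int) (out : String) : Decidable (Spec_trouvesignal chaine out) := by unfold Spec_trouvesignal; infer_instance

-- ===== CLAIM (what is proved, stated in full; the proofs are below) =====
def Claim_equal_trouvesignal : Prop := ∀ (chaine : List Int), Dom_trouvesignal chaine → Spec_trouvesignal chaine (trouvesignal chaine)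

-- ===== LEMMAS AND PROOFS =====

-- the odd-position values chaine[1], chaine[3], …  (= port B's local `odd`)
def oddOf (chaine : List Int) : List Int :=
  (PySem.List.pyRange 0 ((chaine.length : Int) / 2) 1).map (fun j => PySem.List.pyGetD chaine (2 * j + 1) 0)

-- the signal condition both programs decide
def Psig (chaine : List Int) : Prop :=
  ∃ i ∈ PySem.List.pyRange 0 ((chaine.length : Int) / 2 - 1) 1,
    (75 < PySem.List.pyGetD (oddOf chaine) i 0 ∧ PySem.List.pyGetD (oddOf chaine) i 0 < 128) ∧
    ∃ j ∈ PySem.List.pyRange (i + 15) (min (i + 30) ((chaine.length : Int) / 2)) 1,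
      (65 < PySem.List.pyGetD (oddOf chaine) j 0 ∧ PySem.List.pyGetD (oddOf chaine) j 0 < 128)

lemma ite_ok_or (b : Bool) : (if b then "ok" else "rien") = "ok" ∨ (if b then "ok" else "rien") = "rien" := by
  cases b <;> simp

lemma ite_ok_iff (b : Bool) : (if b then "ok" else "rien") = "ok" ↔ b = true := by
  cases b <;> simp

-- a while loop that stops at the first hit computes `any`
lemma foldl_stop_any {α : Type} (l : List α) (g : α → Bool) (F : Bool → α → Bool)
    (hF : ∀ t x, F t x = (t || g x)) : ∀ t : Bool, l.foldl F t = (t || l.any g) := by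
  induction l with
  | nil => intro t; simp
  | cons x xs ih =>
      intro t
      rw [List.foldl_cons, hF, ih, List.any_cons]
      cases t <;> cases g x <;> simp

-- port B's prefix-sum loop, characterised
lemma prefAux (l ys : List Int) (s : Int) :
    (l.foldl (fun (p : List Int × Int) x => (p.1 ++ [p.2 + x], p.2 + x)) (ys, s)).1
      = ys ++ (List.range l.length).map (fun k => s + (l.take (k + 1)).sum) := by
  induction l generalizing ys s with
  | nil => simp
  | cons x xs ih =>
      rw [List.foldl_cons]
      dsimp only
      rw [ih, List.length_cons, List.range_succ_eq_map]
      simp [List.map_map, Function.comp_def, List.take_succ_cons, add_assoc]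

lemma prefEq (l : List Int) :
    (l.foldl (fun (p : List Int × Int) x => (p.1 ++ [p.2 + x], p.2 + x)) ([0], 0)).1
      = (List.range (l.length + 1)).map (fun k => (l.take k).sum) := by
  rw [prefAux, List.range_succ_eq_map]
  simp [List.map_map, Function.comp_def]

-- a sum of 0/1 indicators is positive iff some element satisfies the predicate
lemma sum_ite_pos_iff (l : List Int) (p : Int → Prop) [DecidablePred p] :
    0 < (l.map (fun v => if p v then (1 : Int) else 0)).sum ↔ ∃ v ∈ l, p v := by
  induction l with
  | nil => simp
  | cons x xs ih =>
      have hnn : 0 ≤ (xs.map (fun v => if p v then (1 : Int) else 0)).sum := by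
        apply List.sum_nonneg
        intro y hy
        simp only [List.mem_map] at hy
        obtain ⟨v, _, rfl⟩ := hy
        split <;> norm_num
      by_cases h : p x
      · simp only [List.map_cons, List.sum_cons, if_pos h]
        constructor
        · intro _; exact ⟨x, List.mem_cons_self, h⟩
        · intro _; omega
      · simp only [List.map_cons, List.sum_cons, if_neg h, zero_add, ih]
        constructor
        · rintro ⟨v, hv, hpv⟩; exact ⟨v, List.mem_cons_of_mem _ hv, hpv⟩
        · rintro ⟨v, hv, hpv⟩
          rcases List.mem_cons.mp hv with rfl | hv'
          · exact absurd hpv h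
          · exact ⟨v, hv', hpv⟩

lemma oddOf_length (chaine : List Int) : (oddOf chaine).length = ((chaine.length : Int) / 2).toNat := by
  simp [oddOf, PySem.List.length_pyRange_one]

lemma oddOf_get (chaine : List Int) (j : Int) (h0 : 0 ≤ j) (hm : j < (chaine.length : Int) / 2) :
    PySem.List.pyGetD (oddOf chaine) j 0 = PySem.List.pyGetD chaine (2 * j + 1) 0 := by
  exact PySem.List.pyGetD_map_pyRange_of_nonneg _ _ j 0 h0 hm

lemma A_char (chaine : List Int) :
    (trouvesignal chaine = "ok" ↔ Psig chaine) ∧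
    (trouvesignal chaine = "ok" ∨ trouvesignal chaine = "rien") := by
  simp only [trouvesignal, PySem.List.len_eq]
  refine ⟨?_, ?_⟩
  case refine_2 => exact ite_ok_or _
  rw [ite_ok_iff]
  have hF : ∀ (t : Bool) (i : Int),
      (if t then t
       else
         if PySem.List.pyGetD chaine (2 * i + 1) 0 > 75 ∧ PySem.List.pyGetD chaine (2 * i + 1) 0 < 128 then
           (PySem.List.pyRange 15 30 1).foldl (fun t b =>
             if 2 * (i + b) + 1 < (chaine.length : Int) then
               if PySem.List.pyGetD chaine (2 * (i + b) + 1) 0 > 65 ∧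
                  PySem.List.pyGetD chaine (2 * (i + b) + 1) 0 < 128 then true
               else t
             else t) t
         else t)
      = (t || (decide (PySem.List.pyGetD chaine (2 * i + 1) 0 > 75 ∧ PySem.List.pyGetD chaine (2 * i + 1) 0 < 128) &&
          (PySem.List.pyRange 15 30 1).any (fun b =>
            decide (2 * (i + b) + 1 < (chaine.length : Int)) &&
            decide (PySem.List.pyGetD chaine (2 * (i + b) + 1) 0 > 65 ∧
                    PySem.List.pyGetD chaine (2 * (i + b) + 1) 0 < 128)))) := by
    intro t i
    have hin : ∀ (t : Bool), (PySem.List.pyRange 15 30 1).foldl (fun t b =>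
             if 2 * (i + b) + 1 < (chaine.length : Int) then
               if PySem.List.pyGetD chaine (2 * (i + b) + 1) 0 > 65 ∧
                  PySem.List.pyGetD chaine (2 * (i + b) + 1) 0 < 128 then true
               else t
             else t) t
        = (t || (PySem.List.pyRange 15 30 1).any (fun b =>
            decide (2 * (i + b) + 1 < (chaine.length : Int)) &&
            decide (PySem.List.pyGetD chaine (2 * (i + b) + 1) 0 > 65 ∧
                    PySem.List.pyGetD chaine (2 * (i + b) + 1) 0 < 128))) := by
      apply foldl_stop_any
      intro t b
      by_cases h1 : 2 * (i + b) + 1 < (chaine.length : Int) <;>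
        by_cases h2 : PySem.List.pyGetD chaine (2 * (i + b) + 1) 0 > 65 ∧
                  PySem.List.pyGetD chaine (2 * (i + b) + 1) 0 < 128 <;>
        simp [h1, h2]
    cases t
    · simp only [Bool.false_eq_true, if_false, Bool.false_or]
      by_cases hc : PySem.List.pyGetD chaine (2 * i + 1) 0 > 75 ∧ PySem.List.pyGetD chaine (2 * i + 1) 0 < 128
      · rw [if_pos hc, hin, decide_eq_true hc, Bool.true_and, Bool.false_or]
      · rw [if_neg hc]
        simp [hc]
    · simp
  have hFold := foldl_stop_any (PySem.List.pyRange 0 (PySem.Int.floordiv ((chaine.length : Int)) 2 - 1) 1) _ _ hF false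
  refine (Eq.to_iff (congrArg (fun b => b = true) hFold)).trans ?_
  rw [Bool.false_or]
  rw [PySem.Int.floordiv_eq_ediv_of_pos (by norm_num : (0:Int) < 2)]
  simp only [Psig, List.any_eq_true, Bool.and_eq_true, decide_eq_true_iff, PySem.List.mem_pyRange_one]
  constructor
  · rintro ⟨i, ⟨hi0, hi1⟩, ⟨h75, h128⟩, b, ⟨hb0, hb1⟩, hlt, h65, h128'⟩
    refine ⟨i, ⟨hi0, hi1⟩, ?_, ⟨i + b, ⟨by omega, by omega⟩, ?_⟩⟩
    · rw [oddOf_get chaine i hi0 (by omega)]; exact ⟨h75, h128⟩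
    · rw [oddOf_get chaine (i + b) (by omega) (by omega)]; exact ⟨h65, h128'⟩
  · rintro ⟨i, ⟨hi0, hi1⟩, hval, j, ⟨hj0, hj1⟩, hjv⟩
    rw [oddOf_get chaine i hi0 (by omega)] at hval
    rw [oddOf_get chaine j (by omega) (by omega)] at hjv
    refine ⟨i, ⟨hi0, hi1⟩, ⟨hval.1, hval.2⟩, ⟨j - i, ⟨by omega, by omega⟩, by omega, ?_⟩⟩
    have hji : i + (j - i) = j := by ring
    rw [hji]
    exact ⟨hjv.1, hjv.2⟩

lemma take_sum_get (l : List Int) (K : Int) (h0 : 0 ≤ K) (h1 : K ≤ (l.length : Int)) :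
    PySem.List.pyGetD ((List.range (l.length + 1)).map (fun k => (l.take k).sum)) K 0
      = (l.take K.toNat).sum := by
  rw [PySem.List.pyGetD_eq_getElem _ 0 h0 (by simp; omega)]
  simp

lemma seg_pos_iff (odd : List Int) (lo hi : Int) (h0 : 0 ≤ lo) (hlh : lo ≤ hi)
    (hhm : hi ≤ (odd.length : Int)) (p : Int → Prop) [DecidablePred p] :
    (((odd.map (fun v => if p v then (1 : Int) else 0)).take hi.toNat).sum
      - ((odd.map (fun v => if p v then (1 : Int) else 0)).take lo.toNat).sum > 0)
    ↔ ∃ j : Int, (lo ≤ j ∧ j < hi) ∧ p (PySem.List.pyGetD odd j 0) := by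
  have hsplit : (odd.map (fun v => if p v then (1 : Int) else 0)).take hi.toNat
      = (odd.map (fun v => if p v then (1 : Int) else 0)).take lo.toNat
        ++ (((odd.map (fun v => if p v then (1 : Int) else 0)).drop lo.toNat).take (hi.toNat - lo.toNat)) := by
    rw [← List.take_add]
    congr 1
    omega
  rw [hsplit, List.sum_append]
  have hmid : ((odd.map (fun v => if p v then (1 : Int) else 0)).drop lo.toNat).take (hi.toNat - lo.toNat)
      = ((odd.drop lo.toNat).take (hi.toNat - lo.toNat)).map (fun v => if p v then (1 : Int) else 0) := by
    rw [List.map_take, List.map_drop]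
  have hpos : (((odd.map (fun v => if p v then (1:Int) else 0)).take lo.toNat).sum
      + (((odd.map (fun v => if p v then (1:Int) else 0)).drop lo.toNat).take (hi.toNat - lo.toNat)).sum
      - ((odd.map (fun v => if p v then (1:Int) else 0)).take lo.toNat).sum > 0)
      ↔ 0 < ((((odd.drop lo.toNat).take (hi.toNat - lo.toNat)).map (fun v => if p v then (1:Int) else 0)).sum) := by
    rw [hmid]; omega
  rw [gt_iff_lt] at hpos ⊢
  rw [hpos, sum_ite_pos_iff]
  constructor
  · rintro ⟨v, hv, hpv⟩
    rw [List.mem_iff_getElem] at hv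
    obtain ⟨jn, hjn, heq⟩ := hv
    have hlen : jn < hi.toNat - lo.toNat ∧ lo.toNat + jn < odd.length := by
      simp [List.length_take, List.length_drop] at hjn
      omega
    have heq' : odd[lo.toNat + jn]'(hlen.2) = v := by
      rw [← heq]
      simp [List.getElem_take, List.getElem_drop]
    refine ⟨((lo.toNat + jn : Nat) : Int), ⟨by omega, by omega⟩, ?_⟩
    rw [PySem.List.pyGetD_eq_getElem _ 0 (by omega) (by push_cast; omega)]
    simp only [Int.toNat_natCast]
    rw [heq']
    exact hpv
  · rintro ⟨j, ⟨hj0, hj1⟩, hpj⟩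
    rw [PySem.List.pyGetD_eq_getElem _ 0 (by omega) (by omega)] at hpj
    have hidx : j.toNat < odd.length := by omega
    have hidx2 : lo.toNat + (j.toNat - lo.toNat) = j.toNat := by omega
    refine ⟨odd[j.toNat], ?_, hpj⟩
    rw [List.mem_iff_getElem]
    refine ⟨j.toNat - lo.toNat, by simp [List.length_take, List.length_drop]; omega, ?_⟩
    simp only [List.getElem_take, List.getElem_drop, hidx2]

lemma oddOf_def (chaine : List Int) :
    (PySem.List.pyRange 0 ((chaine.length : Int) / 2) 1).map
      (fun j => PySem.List.pyGetD chaine (2 * j + 1) 0) = oddOf chaine := rfl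

lemma B_char (chaine : List Int) :
    (trouvesignal_alt chaine = "ok" ↔ Psig chaine) ∧
    (trouvesignal_alt chaine = "ok" ∨ trouvesignal_alt chaine = "rien") := by
  simp only [trouvesignal_alt, PySem.List.len_eq,
    PySem.Int.floordiv_eq_ediv_of_pos (show (0:Int) < 2 by norm_num), oddOf_def]
  refine ⟨?_, ite_ok_or _⟩
  rw [ite_ok_iff, List.find?_isSome]
  simp only [prefEq, Psig, PySem.List.mem_pyRange_one, decide_eq_true_iff]
  have hml : ((oddOf chaine).map (fun v => if 65 < v ∧ v < 128 then (1:Int) else 0)).length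
      = (oddOf chaine).length := by simp
  have hol : ((oddOf chaine).length : Int) = (chaine.length : Int) / 2 := by
    rw [oddOf_length]; omega
  refine exists_congr (fun i => ?_)
  constructor
  · rintro ⟨⟨hi0, hi1⟩, ⟨h75, h128⟩, hdiff⟩
    rw [take_sum_get _ _ (by omega) (by rw [hml]; omega),
        take_sum_get _ _ (by omega) (by rw [hml]; omega)] at hdiff
    obtain ⟨j, ⟨hj0, hj1⟩, hpj⟩ :=
      (seg_pos_iff (oddOf chaine) (min (i + 15) ((chaine.length : Int) / 2))
        (min (i + 30) ((chaine.length : Int) / 2)) (by omega) (by omega) (by omega) _).mp hdiff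
    exact ⟨⟨hi0, hi1⟩, ⟨h75, h128⟩, j, ⟨by omega, hj1⟩, hpj⟩
  · rintro ⟨⟨hi0, hi1⟩, ⟨h75, h128⟩, j, ⟨hj0, hj1⟩, hpj⟩
    refine ⟨⟨hi0, hi1⟩, ⟨h75, h128⟩, ?_⟩
    rw [take_sum_get _ _ (by omega) (by rw [hml]; omega),
        take_sum_get _ _ (by omega) (by rw [hml]; omega)]
    exact (seg_pos_iff (oddOf chaine) (min (i + 15) ((chaine.length : Int) / 2))
        (min (i + 30) ((chaine.length : Int) / 2)) (by omega) (by omega) (by omega) _).mpr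
      ⟨j, ⟨by omega, hj1⟩, hpj⟩

lemma main_eq (chaine : List Int) : trouvesignal chaine = trouvesignal_alt chaine := by
  obtain ⟨hA, hAor⟩ := A_char chaine
  obtain ⟨hB, hBor⟩ := B_char chaine
  by_cases h : Psig chaine
  · rw [hA.mpr h, hB.mpr h]
  · rcases hAor with hA1 | hA1
    · exact absurd (hA.mp hA1) h
    rcases hBor with hB1 | hB1
    · exact absurd (hB.mp hB1) h
    rw [hA1, hB1]

-- ===== VERDICT (by name: the statement is the Claim_ definition above) =====
theorem trouvesignal_spec : Claim_equal_trouvesignal := by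
  intro chaine _
  unfold Spec_trouvesignal
  exact main_eq chaine
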